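-- pv_equiv track=rewrite | github.com/yhzhu99/MedAgentBoard | medagentboard/medqa/evaluate.py | extract_score_from_llm_output
-- ===== SOURCE A (Python) =====
-- def extract_score_from_llm_output(output_string: str) -> int | None:
--     """
--     Extracts the first integer value associated with the key "score"
--     from a potentially malformed JSON-like string output by an LLM.
--
--     It specifically looks for '"score":' followed by optional whitespace
--     and then an integer. It does not rely on full JSON parsing.
--
--     Args:
--         output_string: The string output from the LLM, expected to contain
--                        a '"score": <number>' pattern.
--
--     Returns:
--         The extracted integer score if found, otherwise None.
--     """
--     if not output_string:
--         return None
--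
--     # Option 1: Using string manipulation (more step-by-step)
--     try:
--         # Find the position of '"score":'
--         score_key = '"score":'
--         key_index = output_string.find(score_key)
--
--         if key_index == -1:
--             # Try with single quotes as a fallback, as LLMs might hallucinate them
--             score_key = "'score':"
--             key_index = output_string.find(score_key)
--             if key_index == -1:
--                 return None # Key not found
--
--         # Start searching for the number right after '"score":'
--         start_search_index = key_index + len(score_key)
--
--         # Skip any whitespace characters immediately after the colon
--         num_start_index = start_search_index
--         while num_start_index < len(output_string) and output_string[num_start_index].isspace():
--             num_start_index += 1
--
--         if num_start_index == len(output_string):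
--             return None # Reached end of string without finding a number
--
--         # Extract consecutive digits
--         num_end_index = num_start_index
--         while num_end_index < len(output_string) and output_string[num_end_index].isdigit():
--             num_end_index += 1
--
--         # If no digits were found right after skipping whitespace
--         if num_end_index == num_start_index:
--             return None
--
--         # Extract the number string and convert to int
--         number_str = output_string[num_start_index:num_end_index]
--         return int(number_str)
--
--     except Exception:
--         # Catch any unexpected errors during string processing
--         return None
-- ===== SOURCE B (Python) =====
-- def extract_score_from_llm_output(output_string: str) -> int | None:
--     """Single fused left-to-right scan: match both keys in place while walking
--     the string once, returning immediately at a double-quote key and keeping a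
--     speculative parse result for the first single-quote key as fallback."""
--
--     def parse_after(j: int) -> int | None:
--         # One loop over the tail: skip leading whitespace, then gather the
--         # digit run; stop at the first character that fits neither role.
--         digits = ''
--         for c in output_string[j:]:
--             if c.isdigit():
--                 digits += c
--             elif digits or not c.isspace():
--                 break
--         return int(digits) if digits else None
--
--     fallback, seen = None, False
--     for i in range(len(output_string)):
--         if output_string.startswith('"score":', i):
--             return parse_after(i + 8)
--         if not seen and output_string.startswith("'score':", i):
--             seen, fallback = True, parse_after(i + 8)
--     return fallback
-- ===== Notes on version B (the rewrite author's own statement) =====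
-- stated objective: alternative
-- what changed: Replaces A's staged pipeline (two whole-string find() calls, then two separate index-advancing while loops and a slice) with one fused left-to-right scan that matches both keys in place, returns immediately at a double-quote key, keeps a speculative parse memo for the first single-quote key, and parses the number in a single loop that handles whitespace-skipping and digit-gathering together.
import Mathlib
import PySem

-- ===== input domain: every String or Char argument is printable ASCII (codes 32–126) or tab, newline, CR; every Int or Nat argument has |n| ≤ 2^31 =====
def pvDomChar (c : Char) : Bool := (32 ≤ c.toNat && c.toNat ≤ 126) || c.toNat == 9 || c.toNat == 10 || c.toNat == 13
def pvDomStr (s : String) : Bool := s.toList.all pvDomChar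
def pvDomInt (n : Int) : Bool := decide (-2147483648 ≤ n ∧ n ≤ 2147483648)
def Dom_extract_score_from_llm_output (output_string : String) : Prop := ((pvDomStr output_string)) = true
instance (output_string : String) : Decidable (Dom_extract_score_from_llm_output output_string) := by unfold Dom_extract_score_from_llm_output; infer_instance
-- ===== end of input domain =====

-- B replaces A's staged two-find / two-while-loop pipeline by one fused left-to-right scan that
-- matches both keys in place (early return at the double-quote key, a speculative parse memo for
-- the first single-quote key) and parses the number in a single loop (objective: alternative).

-- ===== PORT A =====
-- 'while i < len(s) and p(s[i]): i += 1' — the index after the scan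
def pvSkipWhile (p : Char → Bool) (s : List Char) (i : Nat) : Nat :=
  if h : i < s.length then
    if p s[i] then pvSkipWhile p s (i + 1) else i
  else i
termination_by s.length - i

def extract_score_from_llm_output (output_string : String) : Option Int :=
  let s := output_string.toList
  if s.length = 0 then none else                               -- if not output_string: return None
  let k1 := PySem.Chars.find s "\"score\":".toList             -- output_string.find('"score":')
  let keyIndex := if k1 = -1 then PySem.Chars.find s "'score':".toList else k1
  if keyIndex = -1 then none else
  let startSearch := keyIndex.toNat + 8                        -- key_index + len(score_key); keyIndex ≥ 0 here
  let numStart := pvSkipWhile PySem.Chars.isspace s startSearch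
  if numStart = s.length then none else
  let numEnd := pvSkipWhile PySem.Chars.isdigit s numStart
  if numEnd = numStart then none else
  -- int(output_string[num_start_index:num_end_index]); ofChars? none = the ValueError the except swallows into None
  PySem.Int.ofChars? (PySem.List.slice s (some (numStart : Int)) (some (numEnd : Int)))

-- ===== PORT B =====
-- the 'for c in output_string[j:]' loop of parse_after: gather the digit run, skipping leading
-- whitespace while no digit has been seen, stopping at the first char that fits neither role
def pvParseCollect (cs : List Char) (digits : List Char) : List Char :=
  match cs with
  | [] => digits
  | c :: rest =>
    if PySem.Chars.isdigit c then pvParseCollect rest (digits ++ [c])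
    else if digits.isEmpty && PySem.Chars.isspace c then pvParseCollect rest digits
    else digits

def pvParseAfter (s : List Char) (j : Nat) : Option Int :=
  let digits := pvParseCollect (PySem.List.slice s (some (j : Int))) []   -- output_string[j:]
  if digits.isEmpty then none else PySem.Int.ofChars? digits              -- int(digits) if digits else None

-- the 'for i in range(len(output_string))' scan carrying the (seen, fallback) memo;
-- output_string.startswith(key, i) = PySem.Chars.startswith (s.drop i) key
def pvScan (s : List Char) (i : Nat) (seen : Bool) (fallback : Option Int) : Option Int :=
  if h : i < s.length then
    if PySem.Chars.startswith (s.drop i) "\"score\":".toList then pvParseAfter s (i + 8)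
    else if !seen && PySem.Chars.startswith (s.drop i) "'score':".toList then
      pvScan s (i + 1) true (pvParseAfter s (i + 8))
    else pvScan s (i + 1) seen fallback
  else fallback
termination_by s.length - i

def extract_score_from_llm_output_alt (output_string : String) : Option Int :=
  pvScan output_string.toList 0 false none

-- ===== PRECONDITION & SPEC =====
def Spec_extract_score_from_llm_output (output_string : String) (out : Option Int) : Prop := out = extract_score_from_llm_output_alt output_string
instance (output_string : String) (out : Option Int) : Decidable (Spec_extract_score_from_llm_output output_string out) := by unfold Spec_extract_score_from_llm_output; infer_instance

-- ===== CLAIM (what is proved, stated in full; the proofs are below) =====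
def Claim_equal_extract_score_from_llm_output : Prop := ∀ (output_string : String), Dom_extract_score_from_llm_output output_string → Spec_extract_score_from_llm_output output_string (extract_score_from_llm_output output_string)

-- ===== LEMMAS AND PROOFS =====
theorem pvSkipWhile_eq (p : Char → Bool) (s : List Char) (i : Nat) :
    pvSkipWhile p s i = i + ((s.drop i).takeWhile p).length := by
  unfold pvSkipWhile
  split
  · next h =>
    have hd : s.drop i = s[i] :: s.drop (i + 1) := List.drop_eq_getElem_cons h
    split
    · next hp =>
      rw [pvSkipWhile_eq p s (i + 1), hd, List.takeWhile_cons, if_pos hp]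
      simp
      omega
    · next hp =>
      rw [hd, List.takeWhile_cons, if_neg (by simp [hp])]
      simp
  · next h =>
    rw [List.drop_eq_nil_of_le (by omega)]
    simp
termination_by s.length - i

theorem pv_takeWhile_len_le (p : Char → Bool) (l : List Char) :
    (l.takeWhile p).length ≤ l.length := by
  induction l with
  | nil => simp
  | cons a t ih =>
    by_cases h : p a
    · simp [h]
      omega
    · simp [h]

theorem pv_dropWhile_eq_drop (p : Char → Bool) (l : List Char) :
    l.dropWhile p = l.drop (l.takeWhile p).length := by
  induction l with
  | nil => simp
  | cons a t ih => by_cases h : p a <;> simp [h, ih]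

theorem pv_isdigit_not_isspace (c : Char) (h : PySem.Chars.isdigit c = true) :
    PySem.Chars.isspace c = false := by
  simp [PySem.Chars.isdigit] at h
  have h1 : 48 ≤ c.toNat := h.1
  have h2 : c.toNat ≤ 57 := h.2
  simp [PySem.Chars.isspace]
  omega

-- a found 8-char key occupies s[idx .. idx+8)
theorem pv_find8_bound {s key : List Char} (h8 : key.length = 8)
    (h : ¬ PySem.Chars.find s key = -1) :
    0 ≤ PySem.Chars.find s key ∧ (PySem.Chars.find s key).toNat + 8 ≤ s.length := by
  have h0 : 0 ≤ PySem.Chars.find s key := by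
    have := PySem.Chars.neg_one_le_find (s := s) (sub := key)
    omega
  refine ⟨h0, ?_⟩
  have hpre := (PySem.Chars.find_spec h0).1
  have hlen := hpre.length_le
  simp [List.length_drop, h8] at hlen
  omega

-- pvParseCollect with a nonempty accumulator only extends it by the digit run
theorem pvParseCollect_nonempty (cs : List Char) (acc : List Char) (h : acc ≠ []) :
    pvParseCollect cs acc = acc ++ cs.takeWhile PySem.Chars.isdigit := by
  induction cs generalizing acc with
  | nil => simp [pvParseCollect]
  | cons c rest ih =>
    by_cases hd : PySem.Chars.isdigit c
    · simp [pvParseCollect, hd, ih (acc ++ [c]) (by simp)]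
    · simp [pvParseCollect, hd, List.isEmpty_iff, h]

-- pvParseCollect from the empty accumulator = the digit run after the whitespace prefix
theorem pvParseCollect_nil (cs : List Char) :
    pvParseCollect cs [] = (cs.dropWhile PySem.Chars.isspace).takeWhile PySem.Chars.isdigit := by
  induction cs with
  | nil => simp [pvParseCollect]
  | cons c rest ih =>
    by_cases hd : PySem.Chars.isdigit c
    · have hs := pv_isdigit_not_isspace c hd
      simp [pvParseCollect, hd, hs, pvParseCollect_nonempty rest [c] (by simp)]
    · by_cases hs : PySem.Chars.isspace c
      · simp [pvParseCollect, hd, hs, ih]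
      · simp [pvParseCollect, hd, hs]

-- A's tail (two index-advancing scans + slice + int) = B's parse_after at the same position
theorem pv_tail_eq (s : List Char) (n : Nat) (hlen : n ≤ s.length) :
    (if pvSkipWhile PySem.Chars.isspace s n = s.length then none else
     if pvSkipWhile PySem.Chars.isdigit s (pvSkipWhile PySem.Chars.isspace s n) = pvSkipWhile PySem.Chars.isspace s n then none else
     PySem.Int.ofChars? (PySem.List.slice s (some (pvSkipWhile PySem.Chars.isspace s n : Int)) (some (pvSkipWhile PySem.Chars.isdigit s (pvSkipWhile PySem.Chars.isspace s n) : Int))))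
    = pvParseAfter s n := by
  have hw0 := pvSkipWhile_eq PySem.Chars.isspace s n
  rw [pvParseAfter]
  rw [show PySem.List.slice s (some (n : Int)) = s.drop n from by
        rw [PySem.List.slice_from s (by omega)]; simp]
  rw [pvParseCollect_nil]
  set t := s.drop n with ht
  set w := (t.takeWhile PySem.Chars.isspace).length with hwdef
  have hwle : w ≤ t.length := pv_takeWhile_len_le _ _
  have htlen : t.length = s.length - n := by simp [ht]
  have hrest : t.dropWhile PySem.Chars.isspace = t.drop w := pv_dropWhile_eq_drop _ _
  rw [hw0, hrest]
  set rest := t.drop w with hrdef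
  set d := (rest.takeWhile PySem.Chars.isdigit).length with hd
  have hdle : d ≤ rest.length := pv_takeWhile_len_le _ _
  have hrlen : rest.length = t.length - w := by simp [hrdef]
  have hdropnw : s.drop (n + w) = rest := by
    rw [hrdef, ht, List.drop_drop]
  have hdig : pvSkipWhile PySem.Chars.isdigit s (n + w) = (n + w) + d := by
    rw [pvSkipWhile_eq, hdropnw, hd]
  rw [hdig]
  by_cases hend : n + w = s.length
  · have hre : rest = [] := by
      rw [hrdef]
      apply List.drop_eq_nil_of_le
      omega
    simp [hend, hre]
  · simp only [hend, if_false]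
    by_cases hd0 : d = 0
    · have : rest.takeWhile PySem.Chars.isdigit = [] :=
        List.eq_nil_of_length_eq_zero (by omega)
      simp [hd0, this]
    · have hne : ¬ (n + w + d = n + w) := by omega
      have hrne : rest ≠ [] := by
        intro h
        apply hd0
        rw [h] at hdle
        simpa using hdle
      have hsl : PySem.List.slice s (some ((n + w : Nat) : Int)) (some ((n + w + d : Nat) : Int)) = rest.take d := by
        rw [PySem.List.slice_natCast, hdropnw]
        congr 1
        omega
      have htw : rest.take d = rest.takeWhile PySem.Chars.isdigit := by
        rw [hd]
        exact (List.prefix_iff_eq_take.mp (List.takeWhile_prefix _)).symm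
      have hdne : (rest.takeWhile PySem.Chars.isdigit).isEmpty = false := by
        rw [List.isEmpty_eq_false_iff]
        intro hcontra
        apply hd0
        rw [hd, hcontra]
        simp
      simp only [hne, if_false, hsl, htw, hdne, Bool.false_eq_true]

-- find on a nonempty list characterized by its first position
theorem pv_find_eq_coe (s sub : List Char) (j : Nat)
    (hpre : sub <+: s.drop j) (hmin : ∀ m < j, ¬ sub <+: s.drop m) :
    PySem.Chars.find s sub = (j : Int) := by
  have hinf : sub <:+: s := by
    rw [← PySem.Chars.isIn_iff_infix, ← PySem.Chars.exists_prefix_drop_iff_isIn]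
    exact ⟨j, hpre⟩
  have h0 : 0 ≤ PySem.Chars.find s sub := (PySem.Chars.find_nonneg_iff s sub).2 hinf
  obtain ⟨hp, hm⟩ := PySem.Chars.find_spec h0
  set f := (PySem.Chars.find s sub).toNat with hf
  rcases lt_trichotomy f j with h | h | h
  · exact absurd hp (hmin f h)
  · omega
  · exact absurd hpre (hm j h)

-- -1 propagates down a cons
theorem pv_find_tail_none (c : Char) (t sub : List Char)
    (h0 : ¬ sub <+: (c :: t)) (ht : PySem.Chars.find t sub = -1) :
    PySem.Chars.find (c :: t) sub = -1 := by
  rw [PySem.Chars.find_eq_neg_one_iff] at ht ⊢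
  intro hinf
  obtain ⟨j, hj⟩ := (PySem.Chars.exists_prefix_drop_iff_isIn sub (c :: t)).2
    ((PySem.Chars.isIn_iff_infix sub (c :: t)).2 hinf)
  match j with
  | 0 => exact h0 hj
  | j + 1 =>
    apply ht
    rw [← PySem.Chars.isIn_iff_infix, ← PySem.Chars.exists_prefix_drop_iff_isIn]
    exact ⟨j, by simpa using hj⟩

-- a positive find shifts by one down a cons
theorem pv_find_tail_some (c : Char) (t sub : List Char)
    (h0 : ¬ sub <+: (c :: t)) (ht : ¬ PySem.Chars.find t sub = -1) :
    PySem.Chars.find (c :: t) sub = PySem.Chars.find t sub + 1 := by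
  have hnn : 0 ≤ PySem.Chars.find t sub := by
    have := PySem.Chars.neg_one_le_find (s := t) (sub := sub)
    omega
  obtain ⟨hp, hm⟩ := PySem.Chars.find_spec hnn
  set k := (PySem.Chars.find t sub).toNat with hk
  have : PySem.Chars.find (c :: t) sub = ((k + 1 : Nat) : Int) := by
    apply pv_find_eq_coe
    · simpa using hp
    · intro m hmlt
      match m with
      | 0 => exact h0
      | m + 1 =>
        have := hm m (by omega)
        simpa using this
  rw [this]
  omega

-- the scan from position i, given the memo invariant, selects like A does on the suffix
theorem pvScan_eq (s : List Char) (i : Nat) (seen : Bool) (fb : Option Int)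
    (hi : i ≤ s.length) (hfb : seen = false → fb = none) :
    pvScan s i seen fb =
      (if PySem.Chars.find (s.drop i) "\"score\":".toList = -1 then
        (if seen then fb
         else if PySem.Chars.find (s.drop i) "'score':".toList = -1 then none
         else pvParseAfter s (i + (PySem.Chars.find (s.drop i) "'score':".toList).toNat + 8))
       else pvParseAfter s (i + (PySem.Chars.find (s.drop i) "\"score\":".toList).toNat + 8)) := by
  unfold pvScan
  split
  · next h =>
    have hd : s.drop i = s[i] :: s.drop (i + 1) := List.drop_eq_getElem_cons h
    have hstep : ∀ key : List Char, ¬ key <+: s.drop i →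
        (PySem.Chars.find (s.drop i) key = -1 ↔ PySem.Chars.find (s.drop (i + 1)) key = -1) ∧
        (¬ PySem.Chars.find (s.drop (i + 1)) key = -1 →
          PySem.Chars.find (s.drop i) key = PySem.Chars.find (s.drop (i + 1)) key + 1) := by
      intro key hnp
      rw [hd] at hnp
      refine ⟨⟨?_, ?_⟩, ?_⟩
      · intro hneg
        by_contra hc
        have hshift := pv_find_tail_some s[i] (s.drop (i + 1)) key hnp hc
        rw [hd, hshift] at hneg
        have := PySem.Chars.neg_one_le_find (s := s.drop (i + 1)) (sub := key)
        omega
      · intro hneg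
        rw [hd]
        exact pv_find_tail_none _ _ _ hnp hneg
      · intro hc
        rw [hd]
        exact pv_find_tail_some _ _ _ hnp hc
    split
    · next hdq =>
      have hpre : "\"score\":".toList <+: s.drop i := List.isPrefixOf_iff_prefix.mp hdq
      have hfind : PySem.Chars.find (s.drop i) "\"score\":".toList = 0 := by
        have := pv_find_eq_coe (s.drop i) "\"score\":".toList 0 (by simpa using hpre)
          (fun m hm => absurd hm (by omega))
        simpa using this
      rw [if_neg (by rw [hfind]; decide), hfind]
      norm_num
    · next hdq =>
      have hnpre : ¬ "\"score\":".toList <+: s.drop i := fun hc =>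
        hdq (List.isPrefixOf_iff_prefix.mpr hc)
      obtain ⟨hdqiff, hdqshift⟩ := hstep _ hnpre
      split
      · next hsq =>
        obtain ⟨hns, hsw⟩ := Bool.and_eq_true_iff.mp hsq
        have hseen : seen = false := by
          cases seen
          · rfl
          · exact absurd hns (by decide)
        have hpre : "'score':".toList <+: s.drop i := List.isPrefixOf_iff_prefix.mp hsw
        have hsqfind : PySem.Chars.find (s.drop i) "'score':".toList = 0 := by
          have := pv_find_eq_coe (s.drop i) "'score':".toList 0 (by simpa using hpre)
            (fun m hm => absurd hm (by omega))
          simpa using this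
        rw [pvScan_eq s (i + 1) true (pvParseAfter s (i + 8)) (by omega) (by simp)]
        by_cases hdq1 : PySem.Chars.find (s.drop (i + 1)) "\"score\":".toList = -1
        · have hdq0 : PySem.Chars.find (s.drop i) "\"score\":".toList = -1 := hdqiff.mpr hdq1
          rw [if_pos hdq1, if_pos hdq0, if_pos rfl,
            if_neg (show ¬ (seen = true) by simp [hseen]),
            if_neg (show ¬ PySem.Chars.find (s.drop i) "'score':".toList = -1 by rw [hsqfind]; decide),
            hsqfind]
          norm_num
        · have hdq0 : ¬ PySem.Chars.find (s.drop i) "\"score\":".toList = -1 :=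
            fun hc => hdq1 (hdqiff.mp hc)
          rw [if_neg hdq1, if_neg hdq0, hdqshift hdq1]
          congr 1
          have := PySem.Chars.neg_one_le_find (s := s.drop (i + 1)) (sub := "\"score\":".toList)
          omega
      · next hsq =>
        rw [pvScan_eq s (i + 1) seen fb (by omega) hfb]
        by_cases hdq1 : PySem.Chars.find (s.drop (i + 1)) "\"score\":".toList = -1
        · have hdq0 : PySem.Chars.find (s.drop i) "\"score\":".toList = -1 := hdqiff.mpr hdq1
          rw [if_pos hdq1, if_pos hdq0]
          cases seen with
          | true => rw [if_pos rfl, if_pos rfl]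
          | false =>
            rw [if_neg (show ¬ ((false : Bool) = true) by decide),
              if_neg (show ¬ ((false : Bool) = true) by decide)]
            have hnsw : ¬ PySem.Chars.startswith (s.drop i) "'score':".toList = true := by
              intro hc
              exact hsq (Bool.and_eq_true_iff.mpr ⟨by decide, hc⟩)
            have hnsq : ¬ "'score':".toList <+: s.drop i := fun hc =>
              hnsw (List.isPrefixOf_iff_prefix.mpr hc)
            obtain ⟨hsqiff, hsqshift⟩ := hstep _ hnsq
            by_cases hsq1 : PySem.Chars.find (s.drop (i + 1)) "'score':".toList = -1
            · rw [if_pos hsq1, if_pos (hsqiff.mpr hsq1)]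
            · rw [if_neg hsq1, if_neg (fun hc => hsq1 (hsqiff.mp hc)), hsqshift hsq1]
              congr 1
              have := PySem.Chars.neg_one_le_find (s := s.drop (i + 1)) (sub := "'score':".toList)
              omega
        · have hdq0 : ¬ PySem.Chars.find (s.drop i) "\"score\":".toList = -1 :=
            fun hc => hdq1 (hdqiff.mp hc)
          rw [if_neg hdq1, if_neg hdq0, hdqshift hdq1]
          congr 1
          have := PySem.Chars.neg_one_le_find (s := s.drop (i + 1)) (sub := "\"score\":".toList)
          omega
  · next h =>
    have hnil : s.drop i = [] := List.drop_eq_nil_of_le (by omega)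
    have hninf : ∀ key : List Char, key ≠ [] → PySem.Chars.find ([] : List Char) key = -1 := by
      intro key hk
      rw [PySem.Chars.find_eq_neg_one_iff]
      intro hc
      exact hk (List.eq_nil_of_infix_nil hc)
    rw [hnil, hninf _ (by decide), hninf _ (by decide)]
    cases seen with
    | true => simp
    | false => simp [hfb rfl]
termination_by s.length - i

theorem extract_score_eq (output_string : String) :
    extract_score_from_llm_output output_string = extract_score_from_llm_output_alt output_string := by
  simp only [extract_score_from_llm_output, extract_score_from_llm_output_alt]
  set s := output_string.toList with hs
  rw [pvScan_eq s 0 false none (by omega) (fun _ => rfl)]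
  simp only [List.drop_zero]
  by_cases h0 : s.length = 0
  · have hnil : s = [] := List.length_eq_zero_iff.mp h0
    have hninf : ∀ key : List Char, key ≠ [] → PySem.Chars.find ([] : List Char) key = -1 := by
      intro key hk
      rw [PySem.Chars.find_eq_neg_one_iff]
      intro hc
      exact hk (List.eq_nil_of_infix_nil hc)
    rw [hnil, hninf "\"score\":".toList (by decide), hninf "'score':".toList (by decide)]
    simp
  simp only [h0, if_false]
  by_cases hq : PySem.Chars.find s "\"score\":".toList = -1
  · simp only [hq, if_true, if_neg (by simp : ¬ (false = true))]
    by_cases hm : PySem.Chars.find s "'score':".toList = -1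
    · simp only [if_pos hm]
    · simp only [if_neg hm]
      obtain ⟨hpos, hlen⟩ := pv_find8_bound (by decide) hm
      rw [show (0 + (PySem.Chars.find s "'score':".toList).toNat + 8)
            = (PySem.Chars.find s "'score':".toList).toNat + 8 from by omega]
      exact pv_tail_eq s _ hlen
  · simp only [hq, if_false]
    obtain ⟨hpos, hlen⟩ := pv_find8_bound (by decide) hq
    rw [show (0 + (PySem.Chars.find s "\"score\":".toList).toNat + 8)
          = (PySem.Chars.find s "\"score\":".toList).toNat + 8 from by omega]
    exact pv_tail_eq s _ hlen

-- ===== VERDICT (by name: the statement is the Claim_ definition above) =====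
theorem extract_score_from_llm_output_spec : Claim_equal_extract_score_from_llm_output := by
  intro s _
  unfold Spec_extract_score_from_llm_output
  exact extract_score_eq s
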